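-- pv_equiv track=rewrite | github.com/neilfarmer/memoire | lambda/export/exporter.py | _goals_markdown
-- ===== SOURCE A (Python) =====
-- def _goals_markdown(goals: list[dict]) -> str:
--     if not goals:
--         return "# Goals\n\nNo goals found.\n"
--
--     grouped: dict[str, list] = {"active": [], "completed": [], "abandoned": []}
--     for g in goals:
--         grouped.setdefault(g.get("status", "active"), []).append(g)
--
--     label = {"active": "Active", "completed": "Completed", "abandoned": "Abandoned"}
--     lines = ["# Goals\n"]
--     for status in ("active", "completed", "abandoned"):
--         bucket = grouped.get(status, [])
--         if not bucket:
--             continue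
--         lines.append(f"## {label[status]}\n")
--         for g in sorted(bucket, key=lambda x: x.get("created_at", "")):
--             lines.append(f"- **{g.get('title', 'Untitled')}**")
--             if g.get("target_date"):
--                 lines.append(f"  Target: {g['target_date']}")
--             if g.get("description"):
--                 lines.append(f"  {g['description']}")
--             lines.append("")
--
--     return "\n".join(lines)
-- ===== SOURCE B (Python) =====
-- def _goal_lines(g):
--     body = ["- **%s**" % g.get("title", "Untitled")]
--     if g.get("target_date"):
--         body.append("  Target: " + g["target_date"])
--     if g.get("description"):
--         body.append("  " + g["description"])
--     body.append("")
--     return body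
--
--
-- def _goals_markdown(goals: list[dict]) -> str:
--     if not goals:
--         return "# Goals\n\nNo goals found.\n"
--
--     sections = []
--     for status, lab in (("active", "Active"), ("completed", "Completed"), ("abandoned", "Abandoned")):
--         bucket = sorted((g for g in goals if g.get("status", "active") == status),
--                         key=lambda x: x.get("created_at", ""))
--         if bucket:
--             sections.append("## %s\n" % lab)
--             for g in bucket:
--                 sections.extend(_goal_lines(g))
--
--     return "\n".join(["# Goals\n"] + sections)
-- ===== Notes on version B (the rewrite author's own statement) =====
-- stated objective: simpler
-- what changed: B drops A's grouping dict entirely: it iterates the three statuses in fixed order, builds each bucket by filtering goals directly, and emits each goal's lines via a helper returning a list, instead of A's one grouping pass into a dict plus dict lookups and in-place line appends.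
import Mathlib
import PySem

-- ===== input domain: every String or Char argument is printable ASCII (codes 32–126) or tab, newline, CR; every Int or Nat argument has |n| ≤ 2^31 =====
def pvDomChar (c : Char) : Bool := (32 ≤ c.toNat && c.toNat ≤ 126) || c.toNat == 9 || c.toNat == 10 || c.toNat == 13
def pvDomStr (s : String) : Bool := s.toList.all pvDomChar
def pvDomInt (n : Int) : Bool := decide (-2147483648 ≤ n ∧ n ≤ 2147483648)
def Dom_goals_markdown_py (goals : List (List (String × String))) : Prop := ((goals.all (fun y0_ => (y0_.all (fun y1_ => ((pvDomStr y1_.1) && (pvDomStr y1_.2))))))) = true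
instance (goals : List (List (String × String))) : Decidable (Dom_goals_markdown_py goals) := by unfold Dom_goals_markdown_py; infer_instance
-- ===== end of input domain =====

-- B replaces A's grouping dict by three direct filtering scans and a line-emitting
-- helper returning a list (objective: simpler).

-- ===== PORT A =====
-- g.get(k, dflt) on a Python dict passed as an association list: first-match lookup
def pvGet (g : List (String × String)) (k dflt : String) : String :=
  (PySem.Dict.mk g).getD k dflt

def goals_markdown_py (goals : List (List (String × String))) : String :=
  if goals = [] then "# Goals\n\nNo goals found.\n" else
  -- grouped.setdefault(g.get("status","active"), []).append(g)  ==  d[s] = d.get(s, []) + [g]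
  let grouped : PySem.Dict String (List (List (String × String))) :=
    goals.foldl (fun d g => d.modify (pvGet g "status" "active") [] (· ++ [g]))
      (PySem.Dict.ofList [("active", []), ("completed", []), ("abandoned", [])])
  let label : PySem.Dict String String :=
    PySem.Dict.ofList [("active", "Active"), ("completed", "Completed"), ("abandoned", "Abandoned")]
  let lines :=
    ["active", "completed", "abandoned"].foldl (fun lines status =>
      let bucket := grouped.getD status []
      if bucket = [] then lines
      else
        -- label[status]: the key is always present, so getD "" never defaults
        let lines := lines ++ ["## " ++ label.getD status "" ++ "\n"]
        (PySem.List.sorted bucket (fun x => pvGet x "created_at" "") false).foldl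
          (fun lines g =>
            let lines := lines ++ ["- **" ++ pvGet g "title" "Untitled" ++ "**"]
            -- 'if g.get(k):' — both a missing key (None) and "" are falsy
            let lines := if pvGet g "target_date" "" ≠ "" then
                lines ++ ["  Target: " ++ pvGet g "target_date" ""] else lines
            let lines := if pvGet g "description" "" ≠ "" then
                lines ++ ["  " ++ pvGet g "description" ""] else lines
            lines ++ [""]) lines)
      ["# Goals\n"]
  PySem.Str.join "\n" lines

-- ===== PORT B =====
def pvGoalLines (g : List (String × String)) : List String :=
  let body := ["- **" ++ pvGet g "title" "Untitled" ++ "**"]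
  -- 'if g.get(k):' — both a missing key (None) and "" are falsy
  let body := if pvGet g "target_date" "" ≠ "" then
      body ++ ["  Target: " ++ pvGet g "target_date" ""] else body
  let body := if pvGet g "description" "" ≠ "" then
      body ++ ["  " ++ pvGet g "description" ""] else body
  body ++ [""]

def goals_markdown_py_alt (goals : List (List (String × String))) : String :=
  if goals = [] then "# Goals\n\nNo goals found.\n" else
  let sections :=
    [("active", "Active"), ("completed", "Completed"), ("abandoned", "Abandoned")].foldl
      (fun secs sl =>
        let bucket := PySem.List.sorted
          (goals.filter (fun g => pvGet g "status" "active" == sl.1))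
          (fun x => pvGet x "created_at" "") false
        if bucket = [] then secs
        else bucket.foldl (fun secs g => secs ++ pvGoalLines g)
          (secs ++ ["## " ++ sl.2 ++ "\n"])) []
  PySem.Str.join "\n" (["# Goals\n"] ++ sections)

-- ===== PRECONDITION & SPEC =====
def Spec_goals_markdown_py (goals : List (List (String × String))) (out : String) : Prop := out = goals_markdown_py_alt goals
instance (goals : List (List (String × String))) (out : String) : Decidable (Spec_goals_markdown_py goals out) := by unfold Spec_goals_markdown_py; infer_instance

-- ===== CLAIM (what is proved, stated in full; the proofs are below) =====
def Claim_equal_goals_markdown_py : Prop := ∀ (goals : List (List (String × String))), Dom_goals_markdown_py goals → Spec_goals_markdown_py goals (goals_markdown_py goals)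

-- ===== LEMMAS AND PROOFS =====

-- A's grouping loop read back at status s is exactly the direct filter B takes.
lemma grouped_getD (goals : List (List (String × String)))
    (d : PySem.Dict String (List (List (String × String)))) (s : String) :
    (goals.foldl (fun d g => d.modify (pvGet g "status" "active") [] (· ++ [g])) d).getD s []
      = d.getD s [] ++ goals.filter (fun g => pvGet g "status" "active" == s) := by
  have h : goals.foldl (fun d g => d.modify (pvGet g "status" "active") [] (· ++ [g])) d
      = (goals.map (fun g => (pvGet g "status" "active", g))).foldl
          (fun d p => d.modify p.1 [] (· ++ [p.2])) d := by
    rw [List.foldl_map]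
  rw [h, PySem.Dict.getD_foldl_modify_append, List.filter_map, List.map_map]
  rw [show ((fun x => x.2) ∘ fun g : List (String × String) => (pvGet g "status" "active", g)) = id from rfl,
    List.map_id]
  rfl

-- A's inner emission loop appends exactly pvGoalLines g per goal.
lemma emitA (xs : List (List (String × String))) (l : List String) :
    xs.foldl
      (fun lines g =>
        let lines := lines ++ ["- **" ++ pvGet g "title" "Untitled" ++ "**"]
        let lines := if pvGet g "target_date" "" ≠ "" then
            lines ++ ["  Target: " ++ pvGet g "target_date" ""] else lines
        let lines := if pvGet g "description" "" ≠ "" then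
            lines ++ ["  " ++ pvGet g "description" ""] else lines
        lines ++ [""]) l
    = l ++ xs.flatMap pvGoalLines := by
  induction xs generalizing l with
  | nil => simp
  | cons g xs ih =>
    simp only [List.foldl_cons, List.flatMap_cons, ih, pvGoalLines]
    split_ifs <;> simp

-- ===== VERDICT (by name: the statement is the Claim_ definition above) =====
theorem goals_markdown_py_spec : Claim_equal_goals_markdown_py := by
  intro goals _
  unfold Spec_goals_markdown_py goals_markdown_py goals_markdown_py_alt
  by_cases hg : goals = []
  · simp [hg]
  · simp only [if_neg hg, List.foldl_cons, List.foldl_nil]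
    rw [grouped_getD, grouped_getD, grouped_getD]
    simp only [emitA, PySem.List.foldl_append_eq_flatMap]
    have hd : ∀ s : String, s = "active" ∨ s = "completed" ∨ s = "abandoned" →
        (PySem.Dict.ofList [("active", ([] : List (List (String × String)))), ("completed", []), ("abandoned", [])]).getD s [] = [] := by
      rintro s (rfl | rfl | rfl) <;> decide
    rw [hd _ (Or.inl rfl), hd _ (Or.inr (Or.inl rfl)), hd _ (Or.inr (Or.inr rfl))]
    simp only [List.nil_append]
    have lA : (PySem.Dict.ofList [("active", "Active"), ("completed", "Completed"), ("abandoned", "Abandoned")]).getD "active" "" = "Active" := by decide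
    have lC : (PySem.Dict.ofList [("active", "Active"), ("completed", "Completed"), ("abandoned", "Abandoned")]).getD "completed" "" = "Completed" := by decide
    have lB : (PySem.Dict.ofList [("active", "Active"), ("completed", "Completed"), ("abandoned", "Abandoned")]).getD "abandoned" "" = "Abandoned" := by decide
    -- bridge the empty-bucket tests: A tests the unsorted bucket, B the sorted one
    simp only [lA, lC, lB, PySem.List.sorted_eq_nil_iff]
    split_ifs <;> simp [List.append_assoc]
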